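-- pv_equiv track=rewrite | github.com/byrna287/networks | ipCalculator/test.py | networkMaskAddr
-- ===== SOURCE A (Python) =====
-- def networkMaskAddr(cidr_num):
--    b_net_mask = []
--    for i in range(4):
--       if cidr_num >= 8:
--          b_net_mask.append("1" * 8)
--          cidr_num -= 8
--       else:
--          b_str = "1" * cidr_num
--          while len(b_str) < 8:
--             b_str += "0"
--          b_net_mask.append(b_str)
--          cidr_num = 0
--    net_mask_addr = [str(binToDec(b_num)) for b_num in b_net_mask]
--    return ".".join(net_mask_addr)
--
-- def binToDec(b_num):
--    b_num = b_num[::-1]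
--    dec = 0
--    for i in range(len(b_num)):
--       dec += int(b_num[i]) * (2 ** i)
--    return dec
-- ===== SOURCE B (Python) =====
-- def networkMaskAddr(cidr_num):
--     n = min(32, max(0, cidr_num))
--     mask = (0xFFFFFFFF << (32 - n)) & 0xFFFFFFFF
--     return ".".join(str((mask >> s) & 255) for s in (24, 16, 8, 0))
-- ===== Notes on version B (the rewrite author's own statement) =====
-- stated objective: simpler
-- what changed: Replaces A's per-octet binary-string construction (string repetition, while-loop zero padding, and digit-by-digit binary-to-decimal reconversion) with a single clamped whole-address integer mask built by one shift, extracting the four octets with shifts and bitwise ands.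
import Mathlib
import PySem

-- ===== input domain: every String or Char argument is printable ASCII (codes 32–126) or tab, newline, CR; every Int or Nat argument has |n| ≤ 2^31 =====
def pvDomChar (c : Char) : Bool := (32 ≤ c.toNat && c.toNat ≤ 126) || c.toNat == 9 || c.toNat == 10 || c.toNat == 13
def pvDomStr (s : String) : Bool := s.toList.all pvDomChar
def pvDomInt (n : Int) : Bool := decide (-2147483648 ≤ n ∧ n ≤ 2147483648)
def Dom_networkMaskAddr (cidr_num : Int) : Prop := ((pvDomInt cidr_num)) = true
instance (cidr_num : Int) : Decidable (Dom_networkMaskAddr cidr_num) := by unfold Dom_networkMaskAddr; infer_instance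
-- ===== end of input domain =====

-- B replaces A's per-octet binary-string building and binary-to-decimal reconversion by a
-- single clamped whole-address integer mask computed with one shift, then extracts the four octets arithmetically (simpler).

-- ===== PORT A =====

-- while len(b_str) < 8: b_str += "0"   (the loop appends exactly 8 - len(s) zeros; fuel = that count)
def pvPadGo : Nat → List Char → List Char
  | 0, s => s
  | k+1, s => if s.length < 8 then pvPadGo k (s ++ ['0']) else s
def pvPad (s : List Char) : List Char := pvPadGo (8 - s.length) s

-- binToDec: int(b_num[i]) for a '0'/'1' digit char is exactly c.toNat - 48
def pvBinToDec (b_num : List Char) : Int :=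
  let r := b_num.reverse
  (List.range r.length).foldl
    (fun dec i => dec + (Int.ofNat (r.getD i '0').toNat - 48) * 2 ^ i) 0

def networkMaskAddr (cidr_num : Int) : String :=
  let st := (List.range 4).foldl
    (fun (st : List (List Char) × Int) _ =>
      if st.2 ≥ 8 then (st.1 ++ [PySem.List.pyRepeat ['1'] 8], st.2 - 8)
      else (st.1 ++ [pvPad (PySem.List.pyRepeat ['1'] st.2)], 0))
    ([], cidr_num)
  PySem.Str.join "." (st.1.map (fun b => PySem.Int.toStr (pvBinToDec b)))

-- ===== PORT B =====
-- all intermediate values of Source B are nonnegative ints, so Nat arithmetic is exact here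
def networkMaskAddr_alt (cidr_num : Int) : String :=
  let n : Nat := (min 32 (max 0 cidr_num)).toNat
  let mask : Nat := (0xFFFFFFFF <<< (32 - n)) &&& 0xFFFFFFFF
  PySem.Str.join "." (([24, 16, 8, 0] : List Nat).map
    (fun s => PySem.Int.toStr (Int.ofNat ((mask >>> s) &&& 255))))

-- ===== PRECONDITION & SPEC =====
def Spec_networkMaskAddr (cidr_num : Int) (out : String) : Prop := out = networkMaskAddr_alt cidr_num
instance (cidr_num : Int) (out : String) : Decidable (Spec_networkMaskAddr cidr_num out) := by unfold Spec_networkMaskAddr; infer_instance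

-- ===== CLAIM (what is proved, stated in full; the proofs are below) =====
def Claim_equal_networkMaskAddr : Prop := ∀ (cidr_num : Int), Dom_networkMaskAddr cidr_num → Spec_networkMaskAddr cidr_num (networkMaskAddr cidr_num)

-- ===== LEMMAS AND PROOFS =====

lemma pvA_low (n : Int) (h : n ≤ 0) : networkMaskAddr n = "0.0.0.0" := by
  have hrep : PySem.List.pyRepeat ['1'] n = [] := by
    rw [PySem.List.pyRepeat_singleton]
    simp [Int.toNat_of_nonpos h]
  simp only [networkMaskAddr, show List.range 4 = [0,1,2,3] from rfl, List.foldl,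
    if_neg (show ¬ n ≥ 8 by omega), hrep]
  decide

lemma pvA_high (n : Int) (h : 32 ≤ n) : networkMaskAddr n = "255.255.255.255" := by
  simp only [networkMaskAddr, show List.range 4 = [0,1,2,3] from rfl, List.foldl,
    if_pos (show n ≥ 8 by omega), if_pos (show n - 8 ≥ 8 by omega),
    if_pos (show n - 8 - 8 ≥ 8 by omega), if_pos (show n - 8 - 8 - 8 ≥ 8 by omega)]
  decide

lemma pvB_low (n : Int) (h : n ≤ 0) : networkMaskAddr_alt n = "0.0.0.0" := by
  simp only [networkMaskAddr_alt, show max 0 n = 0 by omega, show min (32:Int) 0 = 0 by omega]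
  decide

lemma pvB_high (n : Int) (h : 32 ≤ n) : networkMaskAddr_alt n = "255.255.255.255" := by
  simp only [networkMaskAddr_alt, show max 0 n = n by omega, show min 32 n = 32 by omega]
  decide

-- ===== VERDICT (by name: the statement is the Claim_ definition above) =====
theorem networkMaskAddr_spec : Claim_equal_networkMaskAddr := by
  intro n _
  unfold Spec_networkMaskAddr
  by_cases h : n ≤ 0
  · rw [pvA_low n h, pvB_low n h]
  by_cases h2 : 32 ≤ n
  · rw [pvA_high n h2, pvB_high n h2]
  have h1 : 1 ≤ n := by omega
  have h3 : n ≤ 31 := by omega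
  interval_cases n <;> decide
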